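-- pv_equiv track=rewrite | github.com/ome/ome-zarr-py | ome_zarr/utils.py | strip_common_prefix
-- ===== SOURCE A (Python) =====
-- def strip_common_prefix(parts: list[list[str]]) -> str:
--     """Find and remove the prefix common to all strings.
--
--     Returns the last element of the common prefix.
--     An exception is thrown if no common prefix exists.
--
--     >>> paths = [["a", "b"], ["a", "b", "c"]]
--     >>> strip_common_prefix(paths)
--     'b'
--     >>> paths
--     [['b'], ['b', 'c']]
--     """
--     first_mismatch = 0
--     min_length = min(len(x) for x in parts)
--
--     for idx in range(min_length):
--         if len({x[idx] for x in parts}) == 1: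
--             first_mismatch += 1
--         else:
--             break
--
--     if first_mismatch <= 0:
--         msg = "No common prefix:\n"
--         for path in parts:
--             msg += f"{path}\n"
--         raise Exception(msg)
--     else:
--         common = parts[0][first_mismatch - 1]
--
--     for idx, path in enumerate(parts):
--         parts[idx] = parts[idx][first_mismatch - 1 :]
--
--     return common
-- ===== SOURCE B (Python) =====
-- def _lcp(a, b):
--     """Longest common prefix of two lists of strings."""
--     out = []
--     for x, y in zip(a, b):
--         if x != y:
--             break
--         out.append(x)
--     return out
--
--
-- def strip_common_prefix(parts: list[list[str]]) -> str:
--     """Find and remove the prefix common to all strings (return value: its last element).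
--
--     Computes the common prefix by folding a pairwise longest-common-prefix
--     helper over the rows, instead of scanning column by column over all rows.
--     Mutates `parts` in place like the original (each row loses the prefix
--     except its last element).
--     """
--     if not parts:
--         raise ValueError("parts must be non-empty")
--     prefix = parts[0]
--     for row in parts[1:]:
--         prefix = _lcp(prefix, row)
--     if not prefix:
--         msg = "No common prefix:\n"
--         for path in parts:
--             msg += f"{path}\n"
--         raise Exception(msg)
--     common = prefix[-1]
--     k = len(prefix)
--     for idx in range(len(parts)):
--         parts[idx] = parts[idx][k - 1:]
--     return common
-- ===== Notes on version B (the rewrite author's own statement) =====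
-- stated objective: alternative
-- what changed: Replaces A's column-by-column scan that builds a set of all rows' idx-th elements per column with a fold of a pairwise longest-common-prefix helper (zip, stop at first mismatch) over the rows.
import Mathlib
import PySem

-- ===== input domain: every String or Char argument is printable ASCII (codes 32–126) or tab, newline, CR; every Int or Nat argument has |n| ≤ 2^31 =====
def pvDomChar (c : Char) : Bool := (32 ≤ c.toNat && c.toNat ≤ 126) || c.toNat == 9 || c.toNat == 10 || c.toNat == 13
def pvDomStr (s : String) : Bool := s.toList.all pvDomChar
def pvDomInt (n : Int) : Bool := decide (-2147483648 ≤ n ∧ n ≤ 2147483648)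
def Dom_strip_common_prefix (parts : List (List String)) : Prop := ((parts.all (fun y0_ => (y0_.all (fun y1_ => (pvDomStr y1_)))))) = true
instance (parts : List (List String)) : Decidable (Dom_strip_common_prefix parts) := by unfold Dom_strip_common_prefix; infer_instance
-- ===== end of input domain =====

-- B replaces A's column-by-column scan over all rows by a fold of a pairwise
-- longest-common-prefix helper over the rows (objective: alternative decomposition).
-- Both A and B mutate `parts` in place the same way (each row is sliced from
-- first_mismatch-1); the equivalence proved here is about the RETURN value.

-- ===== PORT A =====
-- the inner `for idx in range(min_length): if len({x[idx] for x in parts}) == 1: … else: break`,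
-- counting matched columns from `idx` with `r` columns remaining
def aLoop (parts : List (List String)) : Nat → Nat → Nat
  | 0, _ => 0
  | r + 1, idx =>
    if PySem.Set.len (PySem.Set.ofList
        (parts.map (fun x => (PySem.List.pyGet? x (idx : Int)).getD ""))) = 1 then
      aLoop parts r (idx + 1) + 1
    else 0

def strip_common_prefix (parts : List (List String)) : String :=
  -- min(len(x) for x in parts); raises ValueError on empty parts (outside Pre_)
  let min_length := ((parts.map List.length).min?).getD 0
  let first_mismatch := aLoop parts min_length 0
  if first_mismatch ≤ 0 then ""  -- Python raises Exception("No common prefix:…") here (outside Pre_)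
  else
    -- common = parts[0][first_mismatch - 1]  (the in-place slicing loop does not affect the return value)
    (PySem.List.pyGet? ((PySem.List.pyGet? parts 0).getD []) ((first_mismatch : Int) - 1)).getD ""

-- ===== PORT B =====
-- _lcp(a, b): zip, stop at the first mismatch, collect the matched elements
def lcp2 (a b : List String) : List String :=
  (((a.zip b).takeWhile (fun p => p.1 == p.2)).map Prod.fst)

def strip_common_prefix_alt (parts : List (List String)) : String :=
  match parts with
  | [] => ""  -- Python raises ValueError here (outside Pre_)
  | p :: rest =>
    let pref := rest.foldl lcp2 p
    if pref = [] then ""  -- Python raises Exception("No common prefix:…") here (outside Pre_)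
    else (PySem.List.pyGet? pref (-1)).getD ""  -- common = prefix[-1]

-- ===== PRECONDITION & SPEC =====
-- Pre_ excludes exactly the inputs on which A raises: empty `parts` (min() raises
-- ValueError) and inputs with no common first element (A raises Exception).
def Pre_strip_common_prefix (parts : List (List String)) : Prop :=
  parts ≠ [] ∧ ∀ q ∈ parts, q ≠ [] ∧ q.head? = (parts.headD []).head?
instance (parts : List (List String)) : Decidable (Pre_strip_common_prefix parts) := by
  unfold Pre_strip_common_prefix; infer_instance

def pvWitness_strip_common_prefix : List (List String) := [["a", "b"], ["a", "b", "c"]]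

def Spec_strip_common_prefix (parts : List (List String)) (out : String) : Prop := out = strip_common_prefix_alt parts
instance (parts : List (List String)) (out : String) : Decidable (Spec_strip_common_prefix parts out) := by unfold Spec_strip_common_prefix; infer_instance

-- ===== CLAIM (what is proved, stated in full; the proofs are below) =====
def Claim_equal_strip_common_prefix : Prop := ∀ (parts : List (List String)), Dom_strip_common_prefix parts → Pre_strip_common_prefix parts → Spec_strip_common_prefix parts (strip_common_prefix parts)

-- ===== LEMMAS AND PROOFS =====

-- lcp2 in structural form
theorem lcp2_nil_left (b : List String) : lcp2 [] b = [] := by simp [lcp2]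

theorem lcp2_nil_right (a : List String) : lcp2 a [] = [] := by
  cases a <;> simp [lcp2]

theorem lcp2_cons (x y : String) (a b : List String) :
    lcp2 (x :: a) (y :: b) = if x = y then x :: lcp2 a b else [] := by
  by_cases h : x = y <;> simp [lcp2, h]

-- lcp2 is the meet in the prefix order
theorem prefix_lcp2_iff (u a b : List String) :
    u <+: lcp2 a b ↔ u <+: a ∧ u <+: b := by
  induction a generalizing b u with
  | nil =>
    simp only [lcp2_nil_left, List.prefix_nil]
    constructor
    · rintro rfl; exact ⟨rfl, List.nil_prefix⟩
    · exact fun h => h.1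
  | cons x a ih =>
    cases b with
    | nil =>
      simp only [lcp2_nil_right, List.prefix_nil]
      constructor
      · rintro rfl; exact ⟨List.nil_prefix, rfl⟩
      · exact fun h => h.2
    | cons y b =>
      rw [lcp2_cons]
      cases u with
      | nil => simp
      | cons z u =>
        by_cases hxy : x = y
        · subst hxy
          simp only [if_true, List.cons_prefix_cons, ih]
          tauto
        · simp only [if_neg hxy, List.prefix_nil, List.cons_prefix_cons]
          constructor
          · intro h; cases h
          · rintro ⟨⟨rfl, _⟩, ⟨rfl, _⟩⟩; exact absurd rfl hxy

theorem prefix_foldl_lcp2_iff (u p : List String) (rest : List (List String)) :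
    u <+: rest.foldl lcp2 p ↔ u <+: p ∧ ∀ q ∈ rest, u <+: q := by
  induction rest generalizing p with
  | nil => simp
  | cons q rest ih =>
    simp only [List.foldl_cons, ih, prefix_lcp2_iff, List.mem_cons]
    constructor
    · rintro ⟨⟨h1, h2⟩, h3⟩
      exact ⟨h1, fun r hr => hr.elim (fun e => e ▸ h2) (h3 r)⟩
    · rintro ⟨h1, h2⟩
      exact ⟨⟨h1, h2 q (Or.inl rfl)⟩, fun r hr => h2 r (Or.inr hr)⟩

-- the condition of A's column loop at column j
def colEq (parts : List (List String)) (j : Nat) : Prop :=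
  PySem.Set.len (PySem.Set.ofList
    (parts.map (fun x => (PySem.List.pyGet? x (j : Int)).getD ""))) = 1

theorem aLoop_unfold_pos (parts : List (List String)) (idx r : Nat)
    (h : colEq parts idx) :
    aLoop parts (r + 1) idx = aLoop parts r (idx + 1) + 1 := by
  unfold colEq at h
  simp only [aLoop]
  rw [if_pos h]

theorem aLoop_unfold_neg (parts : List (List String)) (idx r : Nat)
    (h : ¬ colEq parts idx) :
    aLoop parts (r + 1) idx = 0 := by
  unfold colEq at h
  simp only [aLoop]
  rw [if_neg h]

-- a set built from a constant nonempty list is a singleton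
theorem ofList_const (l : List String) (a : String) (hne : l ≠ [])
    (h : ∀ x ∈ l, x = a) : PySem.Set.ofList l = [a] := by
  induction l with
  | nil => exact absurd rfl hne
  | cons x t ih =>
    have hxa : x = a := h x (List.mem_cons_self ..)
    subst hxa
    rw [PySem.Set.ofList_cons]
    have hd : (PySem.Set.ofList t).discard x = [] := by
      rw [List.eq_nil_iff_forall_not_mem]
      intro y hy
      rw [PySem.Set.mem_discard] at hy
      exact hy.2 (h y (List.mem_cons_of_mem _ ((PySem.Set.mem_ofList ..).mp hy.1)))
    rw [hd]

-- a set of python-length 1 came from an all-equal list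
theorem all_eq_of_len_one (l : List String)
    (h : PySem.Set.len (PySem.Set.ofList l) = 1) :
    ∀ x ∈ l, ∀ y ∈ l, x = y := by
  have hlen : (PySem.Set.ofList l).length = 1 := by
    simpa [PySem.Set.len] using h
  obtain ⟨a, ha⟩ := List.length_eq_one_iff.mp hlen
  intro x hx y hy
  have hx' := (PySem.Set.mem_ofList ..).mpr hx
  have hy' := (PySem.Set.mem_ofList ..).mpr hy
  rw [ha] at hx' hy'
  simp only [List.mem_singleton] at hx' hy'
  exact hx'.trans hy'.symm

-- A's loop counts min (m - idx) r when columns < m agree and column m (if reached) does not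
theorem aLoop_eq (parts : List (List String)) (m : Nat)
    (hT : ∀ j, j < m → colEq parts j) :
    ∀ r idx, idx ≤ m → (m < idx + r → ¬ colEq parts m) →
      aLoop parts r idx = min (m - idx) r := by
  intro r
  induction r with
  | zero => intro idx _ _; simp [aLoop]
  | succ r ih =>
    intro idx hidx hF
    rcases Nat.lt_or_ge idx m with hlt | hge
    · rw [aLoop_unfold_pos _ _ _ (hT idx hlt)]
      rw [ih (idx + 1) hlt (fun h => hF (by omega))]
      omega
    · have heq : idx = m := le_antisymm hidx hge
      rw [aLoop_unfold_neg _ _ _ (heq ▸ hF (by omega))]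
      omega

-- ===== VERDICT (by name: the statement is the Claim_ definition above) =====
theorem strip_common_prefix_spec : Claim_equal_strip_common_prefix := by
  intro parts _dom hpre
  obtain ⟨hne, hall⟩ := hpre
  cases parts with
  | nil => exact absurd rfl hne
  | cons p rest =>
  simp only [List.headD_cons] at hall
  unfold Spec_strip_common_prefix strip_common_prefix strip_common_prefix_alt
  set pref := rest.foldl lcp2 p with hpref
  set m := pref.length with hm
  -- pref is the greatest common prefix of all rows
  have hmeet : ∀ u, u <+: pref ↔ u <+: p ∧ ∀ q ∈ rest, u <+: q := fun u =>
    prefix_foldl_lcp2_iff u p rest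
  have hpp : pref <+: p := ((hmeet pref).mp (List.prefix_refl pref)).1
  have hpq : ∀ q ∈ rest, pref <+: q := ((hmeet pref).mp (List.prefix_refl pref)).2
  have hprefix_all : ∀ q ∈ p :: rest, pref <+: q := by
    intro q hq
    rcases List.mem_cons.mp hq with rfl | hq
    · exact hpp
    · exact hpq q hq
  have htake : pref = p.take m := List.prefix_iff_eq_take.mp hpp
  -- p is nonempty and every row starts with p's head, so m ≥ 1
  obtain ⟨hp_ne, -⟩ := hall p (List.mem_cons_self ..)
  obtain ⟨p0, p', rfl⟩ : ∃ a t, p = a :: t := by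
    cases p with
    | nil => exact absurd rfl hp_ne
    | cons a t => exact ⟨a, t, rfl⟩
  have hm1 : 1 ≤ m := by
    have hu : [p0] <+: pref := by
      rw [hmeet]
      refine ⟨⟨p', rfl⟩, fun q hq => ?_⟩
      obtain ⟨hq_ne, hq_hd⟩ := hall q (List.mem_cons_of_mem _ hq)
      cases q with
      | nil => exact absurd rfl hq_ne
      | cons q0 q' =>
        simp only [List.head?_cons, Option.some.injEq] at hq_hd
        exact ⟨q', by rw [hq_hd]; rfl⟩
    simpa using hu.length_le
  -- min_length
  obtain ⟨v, hv⟩ : ∃ v, (((p0 :: p') :: rest).map List.length).min? = some v := by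
    cases h : (((p0 :: p') :: rest).map List.length).min? with
    | none => rw [List.map_cons, List.min?_cons] at h; exact absurd h (by simp)
    | some v => exact ⟨v, rfl⟩
  have hv_mem := (List.min?_eq_some_iff.mp hv).1
  have hv_le : ∀ b ∈ ((p0 :: p') :: rest).map List.length, v ≤ b :=
    (List.min?_eq_some_iff.mp hv).2
  have hmv : m ≤ v := by
    obtain ⟨q, hq, rfl⟩ := List.mem_map.mp hv_mem
    rw [hm]
    exact (hprefix_all q hq).length_le
  -- length bound for every row
  have hlen_all : ∀ q ∈ (p0 :: p') :: rest, m ≤ q.length := by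
    intro q hq
    rw [hm]
    exact (hprefix_all q hq).length_le
  -- row prefixes: q.take m = pref for every row
  have htake_all : ∀ q ∈ (p0 :: p') :: rest, q.take m = pref := by
    intro q hq
    have := List.prefix_iff_eq_take.mp (hprefix_all q hq)
    exact (hm ▸ this).symm
  -- columns below m all agree
  have hT : ∀ j, j < m → colEq ((p0 :: p') :: rest) j := by
    intro j hj
    unfold colEq
    have hmap : ∀ x ∈ (((p0 :: p') :: rest).map
        (fun x => (PySem.List.pyGet? x (j : Int)).getD "")),
        x = pref[j]'(by omega) := by
      intro x hx
      obtain ⟨q, hq, rfl⟩ := List.mem_map.mp hx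
      have hjq : j < q.length := lt_of_lt_of_le hj (hlen_all q hq)
      rw [PySem.List.pyGet?_natCast, List.getElem?_eq_getElem hjq, Option.getD_some]
      have := (hprefix_all q hq).getElem (i := j) (by omega)
      exact this.symm
    rw [ofList_const _ _ (by simp) hmap]
    rfl
  -- column m (when it exists, i.e. m < v) does not agree
  have hF : m < v → ¬ colEq ((p0 :: p') :: rest) m := by
    intro hmlt hcol
    unfold colEq at hcol
    have hall_eq := all_eq_of_len_one _ hcol
    -- every row then agrees with p on column m, so p.take (m+1) is a common prefix
    have hstep : (p0 :: p').take (m + 1) <+: pref := by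
      rw [hmeet]
      have hmp : m < (p0 :: p').length :=
        lt_of_lt_of_le hmlt (hv_le _ (List.mem_map_of_mem (List.mem_cons_self ..)))
      have hq1 : ∀ q ∈ (p0 :: p') :: rest, q.take (m + 1) = (p0 :: p').take (m + 1) := by
        intro q hq
        have hmq : m < q.length :=
          lt_of_lt_of_le hmlt (hv_le _ (List.mem_map_of_mem hq))
        have hcolq : q[m] = (p0 :: p')[m] := by
          have h1 : q[m] ∈ (((p0 :: p') :: rest).map
              (fun x => (PySem.List.pyGet? x (m : Int)).getD "")) := by
            refine List.mem_map.mpr ⟨q, hq, ?_⟩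
            rw [PySem.List.pyGet?_natCast, List.getElem?_eq_getElem hmq, Option.getD_some]
          have h2 : (p0 :: p')[m] ∈ (((p0 :: p') :: rest).map
              (fun x => (PySem.List.pyGet? x (m : Int)).getD "")) := by
            refine List.mem_map.mpr ⟨p0 :: p', List.mem_cons_self .., ?_⟩
            rw [PySem.List.pyGet?_natCast, List.getElem?_eq_getElem hmp, Option.getD_some]
          exact hall_eq _ h1 _ h2
        rw [List.take_add_one, List.take_add_one, htake_all q hq,
            htake_all (p0 :: p') (List.mem_cons_self ..)]
        rw [List.getElem?_eq_getElem hmq, List.getElem?_eq_getElem hmp, hcolq]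
      constructor
      · rw [← hq1 (p0 :: p') (List.mem_cons_self ..)]
        exact List.take_prefix _ _
      · intro q hq
        rw [← hq1 q (List.mem_cons_of_mem _ hq)]
        exact List.take_prefix _ _
    have hlen := hstep.length_le
    rw [List.length_take] at hlen
    have hmp : m + 1 ≤ (p0 :: p').length :=
      lt_of_lt_of_le hmlt (hv_le _ (List.mem_map_of_mem (List.mem_cons_self ..)))
    omega
  -- evaluate A's loop
  have hfm : aLoop ((p0 :: p') :: rest) v 0 = m := by
    rw [aLoop_eq _ m hT v 0 (Nat.zero_le m) (fun h => hF (by omega))]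
    omega
  -- the values finally picked by A and by B are both pref[m-1] = p[m-1]
  have hmlen : m ≤ (p0 :: p').length := hm ▸ hpp.length_le
  have hApick : (PySem.List.pyGet? ((PySem.List.pyGet? ((p0 :: p') :: rest) 0).getD [])
      ((m : Int) - 1)).getD "" = pref[m - 1]'(by omega) := by
    rw [PySem.List.pyGet?_zero_cons, Option.getD_some]
    have hcast : ((m : Int) - 1) = (((m - 1 : Nat)) : Int) := by omega
    rw [hcast, PySem.List.pyGet?_natCast, List.getElem?_eq_getElem (by omega),
        Option.getD_some]
    exact (hpp.getElem (by omega)).symm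
  have hBpick : (PySem.List.pyGet? pref (-1)).getD "" = pref[m - 1]'(by omega) := by
    rw [PySem.List.pyGet?_neg_one, List.getLast?_eq_getElem?,
        List.getElem?_eq_getElem (by omega), Option.getD_some]
  simp only [hv, Option.getD_some, hfm]
  rw [if_neg (show ¬ m ≤ 0 by omega), if_neg (show ¬ pref = [] by
    intro h; rw [h] at hm; simp at hm; omega)]
  rw [hApick, hBpick]
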